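-- pv_equiv track=rewrite | github.com/an0mium/aragora | aragora/compat/openclaw/next_steps_runner.py | _infer_issue_priority
-- ===== SOURCE A (Python) =====
-- def _infer_issue_priority(labels: list[str]) -> str:
--     """Infer priority from GitHub issue labels."""
--     label_lower = [lb.lower() for lb in labels]
--     if any("critical" in lb or "p0" in lb or "urgent" in lb for lb in label_lower):
--         return "critical"
--     if any("bug" in lb or "p1" in lb for lb in label_lower):
--         return "high"
--     if any("enhancement" in lb or "feature" in lb or "p2" in lb for lb in label_lower):
--         return "medium"
--     return "low"
-- ===== SOURCE B (Python) =====
-- _TIERS = ["critical", "high", "medium", "low"]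
-- _GROUPS = [("critical", "p0", "urgent"), ("bug", "p1"), ("enhancement", "feature", "p2")]
--
--
-- def _label_rank(low: str) -> int:
--     for rank, keywords in enumerate(_GROUPS):
--         if any(k in low for k in keywords):
--             return rank
--     return 3
--
--
-- def _infer_issue_priority(labels: list[str]) -> str:
--     """Infer priority from GitHub issue labels (single running-best pass)."""
--     best = 3
--     for lb in labels:
--         best = min(best, _label_rank(lb.lower()))
--     return _TIERS[best]
-- ===== Notes on version B (the rewrite author's own statement) =====
-- stated objective: alternative
-- what changed: Replaced three sequential any()-scans over the lowercased labels by a single pass that computes a numeric rank per label and maintains a running minimum, mapping the best rank back to a tier name at the end.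
import Mathlib
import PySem

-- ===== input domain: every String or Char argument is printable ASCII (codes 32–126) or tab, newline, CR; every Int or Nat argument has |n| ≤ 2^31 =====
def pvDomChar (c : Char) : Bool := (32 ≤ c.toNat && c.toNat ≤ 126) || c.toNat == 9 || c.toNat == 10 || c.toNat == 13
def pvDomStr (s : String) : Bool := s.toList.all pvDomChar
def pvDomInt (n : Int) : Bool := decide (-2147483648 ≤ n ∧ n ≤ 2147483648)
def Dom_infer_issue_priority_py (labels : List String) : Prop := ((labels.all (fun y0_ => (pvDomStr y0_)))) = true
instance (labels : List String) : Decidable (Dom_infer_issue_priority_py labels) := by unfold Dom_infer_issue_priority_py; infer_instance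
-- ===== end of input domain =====

-- B replaces A's three sequential any()-scans by one pass keeping a running minimum rank (alternative decomposition, same cost).
-- ===== PORT A =====
def infer_issue_priority_py (labels : List String) : String :=
  let label_lower := labels.map (fun lb => PySem.Str.lower lb)
  if label_lower.any (fun lb => PySem.Str.isIn "critical" lb || PySem.Str.isIn "p0" lb || PySem.Str.isIn "urgent" lb) then
    "critical"
  else if label_lower.any (fun lb => PySem.Str.isIn "bug" lb || PySem.Str.isIn "p1" lb) then
    "high"
  else if label_lower.any (fun lb => PySem.Str.isIn "enhancement" lb || PySem.Str.isIn "feature" lb || PySem.Str.isIn "p2" lb) then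
    "medium"
  else
    "low"

-- ===== PORT B =====
-- rank of an (already lowercased) label: index of the first keyword group it matches, else 3
def pvLabelRank (low : String) : Nat :=
  if PySem.Str.isIn "critical" low || PySem.Str.isIn "p0" low || PySem.Str.isIn "urgent" low then 0
  else if PySem.Str.isIn "bug" low || PySem.Str.isIn "p1" low then 1
  else if PySem.Str.isIn "enhancement" low || PySem.Str.isIn "feature" low || PySem.Str.isIn "p2" low then 2
  else 3

def pvTiers : List String := ["critical", "high", "medium", "low"]

def infer_issue_priority_py_alt (labels : List String) : String :=
  let best := labels.foldl (fun b lb => min b (pvLabelRank (PySem.Str.lower lb))) 3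
  pvTiers.getD best "low"

-- ===== PRECONDITION & SPEC =====
def Spec_infer_issue_priority_py (labels : List String) (out : String) : Prop := out = infer_issue_priority_py_alt labels
instance (labels : List String) (out : String) : Decidable (Spec_infer_issue_priority_py labels out) := by unfold Spec_infer_issue_priority_py; infer_instance

-- ===== CLAIM (what is proved, stated in full; the proofs are below) =====
def Claim_equal_infer_issue_priority_py : Prop := ∀ (labels : List String), Dom_infer_issue_priority_py labels → Spec_infer_issue_priority_py labels (infer_issue_priority_py labels)

-- ===== LEMMAS AND PROOFS =====

-- the fold only decreases its accumulator
theorem pvFold_le (labels : List String) (b : Nat) :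
    labels.foldl (fun b lb => min b (pvLabelRank (PySem.Str.lower lb))) b ≤ b := by
  induction labels generalizing b with
  | nil => simp
  | cons x xs ih =>
    simp only [List.foldl_cons]
    exact le_trans (ih _) (min_le_left _ _)

-- the fold is ≤ k iff the start is or some label's rank is
theorem pvFold_le_iff (labels : List String) (b k : Nat) :
    labels.foldl (fun b lb => min b (pvLabelRank (PySem.Str.lower lb))) b ≤ k ↔
      b ≤ k ∨ ∃ lb ∈ labels, pvLabelRank (PySem.Str.lower lb) ≤ k := by
  induction labels generalizing b with
  | nil => simp
  | cons x xs ih =>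
    simp only [List.foldl_cons, ih, min_le_iff, List.mem_cons]
    aesop

theorem pvRank_le_zero_iff (low : String) :
    pvLabelRank low ≤ 0 ↔ (PySem.Str.isIn "critical" low || PySem.Str.isIn "p0" low || PySem.Str.isIn "urgent" low) = true := by
  unfold pvLabelRank; split_ifs <;> simp_all

theorem pvRank_le_one_iff (low : String) :
    pvLabelRank low ≤ 1 ↔ ((PySem.Str.isIn "critical" low || PySem.Str.isIn "p0" low || PySem.Str.isIn "urgent" low) = true ∨
      (PySem.Str.isIn "bug" low || PySem.Str.isIn "p1" low) = true) := by
  unfold pvLabelRank; split_ifs <;> simp_all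

theorem pvRank_le_two_iff (low : String) :
    pvLabelRank low ≤ 2 ↔ ((PySem.Str.isIn "critical" low || PySem.Str.isIn "p0" low || PySem.Str.isIn "urgent" low) = true ∨
      (PySem.Str.isIn "bug" low || PySem.Str.isIn "p1" low) = true ∨
      (PySem.Str.isIn "enhancement" low || PySem.Str.isIn "feature" low || PySem.Str.isIn "p2" low) = true) := by
  unfold pvLabelRank; split_ifs <;> simp_all

theorem infer_issue_priority_py_spec : Claim_equal_infer_issue_priority_py := by
  unfold Claim_equal_infer_issue_priority_py
  intro labels _
  unfold Spec_infer_issue_priority_py infer_issue_priority_py infer_issue_priority_py_alt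
  simp only [List.any_map]
  set m := labels.foldl (fun b lb => min b (pvLabelRank (PySem.Str.lower lb))) 3 with hm
  have hle3 : m ≤ 3 := pvFold_le labels 3
  have hiff : ∀ k, k ≤ 2 → (m ≤ k ↔ ∃ lb ∈ labels, pvLabelRank (PySem.Str.lower lb) ≤ k) := by
    intro k hk
    rw [hm, pvFold_le_iff]
    constructor
    · rintro (h | h)
      · omega
      · exact h
    · exact Or.inr
  split_ifs with h1 h2 h3
  · -- some label is critical
    simp only [List.any_eq_true, Function.comp] at h1
    obtain ⟨lb, hmem, hc⟩ := h1
    have : m ≤ 0 := (hiff 0 (by omega)).2 ⟨lb, hmem, (pvRank_le_zero_iff _).2 hc⟩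
    have : m = 0 := by omega
    simp [this, pvTiers]
  · -- no critical, some bug
    simp only [List.any_eq_true, Function.comp] at h1 h2
    obtain ⟨lb, hmem, hc⟩ := h2
    have hle1 : m ≤ 1 := (hiff 1 (by omega)).2 ⟨lb, hmem, (pvRank_le_one_iff _).2 (Or.inr hc)⟩
    have hne0 : ¬ m ≤ 0 := by
      intro h0
      obtain ⟨lb', hmem', hr'⟩ := (hiff 0 (by omega)).1 h0
      exact h1 ⟨lb', hmem', (pvRank_le_zero_iff _).1 hr'⟩
    have : m = 1 := by omega
    simp [this, pvTiers]
  · -- no critical/bug, some enhancement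
    simp only [List.any_eq_true, Function.comp] at h1 h2 h3
    obtain ⟨lb, hmem, hc⟩ := h3
    have hle2 : m ≤ 2 := (hiff 2 (by omega)).2 ⟨lb, hmem, (pvRank_le_two_iff _).2 (Or.inr (Or.inr hc))⟩
    have hne1 : ¬ m ≤ 1 := by
      intro h0
      obtain ⟨lb', hmem', hr'⟩ := (hiff 1 (by omega)).1 h0
      rcases (pvRank_le_one_iff _).1 hr' with h | h
      · exact h1 ⟨lb', hmem', h⟩
      · exact h2 ⟨lb', hmem', h⟩
    have : m = 2 := by omega
    simp [this, pvTiers]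
  · -- nothing matches
    simp only [List.any_eq_true, Function.comp] at h1 h2 h3
    have hne2 : ¬ m ≤ 2 := by
      intro h0
      obtain ⟨lb', hmem', hr'⟩ := (hiff 2 (by omega)).1 h0
      rcases (pvRank_le_two_iff _).1 hr' with h | h | h
      · exact h1 ⟨lb', hmem', h⟩
      · exact h2 ⟨lb', hmem', h⟩
      · exact h3 ⟨lb', hmem', h⟩
    have : m = 3 := by omega
    simp [this, pvTiers]
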